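-- pv_equiv track=rewrite | github.com/animeshroy/AlgoExpert | run_length_encoding/solution.py | encode_char
-- ===== SOURCE A (Python) =====
-- def encode_char(count, char):
-- 	counts = []
-- 	while count> 9:
-- 		counts.append(9)
-- 		count-=9
-- 		if count > 9:
-- 			continue
-- 		else:
-- 			counts.append(count)
-- 	if not len(counts):
-- 		counts.append(str(count))
-- 	return ''.join([str(x)+char for x in counts])
-- ===== SOURCE B (Python) =====
-- def encode_char(count, char):
--     if count <= 9:
--         parts = [count]
--     else:
--         q, r = divmod(count, 9)
--         parts = [9] * q + ([r] if r else [])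
--     return ''.join(str(x) + char for x in parts)
-- ===== Notes on version B (the rewrite author's own statement) =====
-- stated objective: simpler
-- what changed: Replaces the repeated-subtraction while-loop (with its continue/else append dance) by closed-form divmod arithmetic: the chunk list is [9]*(count//9) plus the nonzero remainder, computed directly.
import Mathlib
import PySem

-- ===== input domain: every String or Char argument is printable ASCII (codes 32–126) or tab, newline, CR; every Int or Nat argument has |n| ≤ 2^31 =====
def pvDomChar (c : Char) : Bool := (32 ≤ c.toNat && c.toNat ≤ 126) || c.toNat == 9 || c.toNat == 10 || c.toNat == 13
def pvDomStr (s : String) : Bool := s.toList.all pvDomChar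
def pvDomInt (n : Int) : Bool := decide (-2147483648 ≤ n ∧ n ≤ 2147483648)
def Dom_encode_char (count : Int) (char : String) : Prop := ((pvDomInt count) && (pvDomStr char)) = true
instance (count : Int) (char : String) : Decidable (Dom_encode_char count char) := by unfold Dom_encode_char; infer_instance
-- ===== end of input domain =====

-- B replaces A's repeated-subtraction while-loop by closed-form divmod arithmetic for the chunk list; objective: simpler.


-- ===== PORT A =====
-- the while-loop: returns the final value of `count` and the final `counts` list
def encodeLoopA (count : Int) (counts : List Int) : Int × List Int :=
  if 9 < count then
    let counts := counts ++ [9]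
    let count := count - 9
    if 9 < count then encodeLoopA count counts
    else (count, counts ++ [count])
  else (count, counts)
termination_by count.toNat
decreasing_by omega

def encode_char (count : Int) (char : String) : String :=
  let p := encodeLoopA count []
  -- `if not len(counts): counts.append(str(count))`; str() is applied to every element at the join
  let counts := if p.2.length = 0 then [p.1] else p.2
  PySem.Str.join "" (counts.map fun x => PySem.Int.toStr x ++ char)

-- ===== PORT B =====
def encode_char_alt (count : Int) (char : String) : String :=
  let parts : List Int :=
    if count ≤ 9 then [count]
    else
      let q := PySem.Int.floordiv count 9
      let r := PySem.Int.mod count 9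
      List.replicate q.toNat 9 ++ (if r ≠ 0 then [r] else [])
  PySem.Str.join "" (parts.map fun x => PySem.Int.toStr x ++ char)

-- ===== PRECONDITION & SPEC =====
def Spec_encode_char (count : Int) (char : String) (out : String) : Prop := out = encode_char_alt count char
instance (count : Int) (char : String) (out : String) : Decidable (Spec_encode_char count char out) := by unfold Spec_encode_char; infer_instance

-- ===== CLAIM (what is proved, stated in full; the proofs are below) =====
def Claim_equal_encode_char : Prop := ∀ (count : Int) (char : String), Dom_encode_char count char → Spec_encode_char count char (encode_char count char)

-- ===== LEMMAS AND PROOFS =====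

-- the remainder chunk A's loop ends with: in 1..9, ≡ count (mod 9)
def rem9 (count : Int) : Int := if count % 9 = 0 then 9 else count % 9

-- characterisation of A's loop for count > 9
theorem encodeLoopA_spec (n : Nat) : ∀ (count : Int), count.toNat ≤ n → 9 < count →
    ∀ acc, encodeLoopA count acc =
      (rem9 count, acc ++ (List.replicate ((count - rem9 count) / 9).toNat 9 ++ [rem9 count])) := by
  induction n with
  | zero => intro count h h9; omega
  | succ n ih =>
    intro count h h9 acc
    rw [encodeLoopA]
    simp only [h9, if_pos]
    by_cases h18 : 9 < count - 9
    · rw [if_pos h18, ih (count - 9) (by omega) h18]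
      have hr : rem9 (count - 9) = rem9 count := by unfold rem9; omega
      rw [hr]
      have hk : ((count - 9 - rem9 count) / 9).toNat + 1 = ((count - rem9 count) / 9).toNat := by
        unfold rem9 at *; split_ifs at * <;> omega
      have : List.replicate ((count - rem9 count) / 9).toNat (9 : Int)
          = 9 :: List.replicate ((count - 9 - rem9 count) / 9).toNat 9 := by
        rw [← hk, List.replicate_succ]
      rw [this]; simp
    · rw [if_neg h18]
      have hr : rem9 count = count - 9 := by unfold rem9; omega
      have hq : ((count - rem9 count) / 9).toNat = 1 := by rw [hr]; omega
      rw [hr] at hq ⊢; rw [hq]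
      simp

theorem encodeLoopA_base (count : Int) (acc : List Int) (h : ¬ 9 < count) :
    encodeLoopA count acc = (count, acc) := by
  rw [encodeLoopA, if_neg h]

theorem encode_char_spec : Claim_equal_encode_char := by
  unfold Claim_equal_encode_char Spec_encode_char
  intro count char hdom
  unfold encode_char encode_char_alt
  by_cases h9 : 9 < count
  · rw [encodeLoopA_spec count.toNat count le_rfl h9]
    simp only [List.nil_append]
    rw [if_neg (by simp : ¬ ((List.replicate ((count - rem9 count) / 9).toNat (9 : Int)
        ++ [rem9 count]).length = 0))]
    have hfd : PySem.Int.floordiv count 9 = count / 9 := PySem.Int.floordiv_eq_ediv_of_pos (by omega)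
    have hmd : PySem.Int.mod count 9 = count % 9 := PySem.Int.mod_eq_emod_of_pos (by omega)
    rw [if_neg (by omega : ¬ count ≤ 9)]
    simp only [hfd, hmd]
    congr 1
    by_cases hr : count % 9 = 0
    · have h1 : rem9 count = 9 := by unfold rem9; rw [if_pos hr]
      have h2 : ((count - rem9 count) / 9).toNat + 1 = (count / 9).toNat := by rw [h1]; omega
      have h3 : (if count % 9 ≠ 0 then [count % 9] else ([] : List Int)) = [] := by
        simp [hr]
      rw [h3, List.append_nil, ← h2, List.replicate_succ', h1]
    · have h1 : rem9 count = count % 9 := by unfold rem9; rw [if_neg hr]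
      have h2 : ((count - rem9 count) / 9).toNat = (count / 9).toNat := by rw [h1]; omega
      have h3 : (if count % 9 ≠ 0 then [count % 9] else ([] : List Int)) = [count % 9] :=
        if_pos hr
      rw [h3, h2, h1]
  · rw [encodeLoopA_base count [] h9]
    simp [if_pos (by omega : count ≤ 9)]
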